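-- pv_equiv track=rewrite | github.com/gretchycat/pymms | gm_pymms/interface.py | drawBigString
-- ===== SOURCE A (Python) =====
-- def drawBigString(s): #interface_ansi
--     chars={}
--     chars['Resolution']='5x4'
--     chars['0']= " ▄▄  "\
--                 "█  █ "\
--                 "▄  ▄ "\
--                 "▀▄▄▀ "
--     chars['1']= "     "\
--                 "   █ "\
--                 "   ▄ "\
--                 "   ▀ "
--     chars['2']= " ▄▄  "\
--                 "   █ "\
--                 "▄▀▀  "\
--                 "▀▄▄  "
--     chars['3']= " ▄▄  "\
--                 "   █ "\
--                 " ▀▀▄ "\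
--                 " ▄▄▀ "
--     chars['4']= "     "\
--                 "█  █ "\
--                 " ▀▀▄ "\
--                 "   ▀ "
--     chars['5']= " ▄▄  "\
--                 "█    "\
--                 " ▀▀▄ "\
--                 " ▄▄▀ "
--     chars['6']= " ▄▄  "\
--                 "█    "\
--                 "▄▀▀▄ "\
--                 "▀▄▄▀ "
--     chars['7']= " ▄▄  "\
--                 "   █ "\
--                 "   ▄ "\
--                 "   ▀ "
--     chars['8']= " ▄▄  "\
--                 "█  █ "\
--                 "▄▀▀▄ "\
--                 "▀▄▄▀ "
--     chars['9']= " ▄▄  "\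
--                 "█  █ "\
--                 " ▀▀▄ "\
--                 " ▄▄▀ "
--     chars[':']= "     "\
--                 "  ●  "\
--                 "  ●  "\
--                 "     "
--     chars[' ']= "     "\
--                 "     "\
--                 "     "\
--                 "     "
--     col,row=chars['Resolution'].split('x')
--     col=int(col)
--     row=int(row)
--     buffer=""
--     for y in range(row):
--         for c in s:
--             fc=chars.get(c)
--             if fc:
--                 buffer+=fc[y*col:(y+1)*col]
--             else:
--                 buffer+=" "
--         buffer+='\n'
--     return buffer
-- ===== SOURCE B (Python) =====
-- # One pass over s maintaining four line buffers (pre-split glyph rows), instead of re-scanning s per row.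
-- _BIG = {
--     '0': (" \u2584\u2584  ", "\u2588  \u2588 ", "\u2584  \u2584 ", "\u2580\u2584\u2584\u2580 "),
--     '1': ("     ", "   \u2588 ", "   \u2584 ", "   \u2580 "),
--     '2': (" \u2584\u2584  ", "   \u2588 ", "\u2584\u2580\u2580  ", "\u2580\u2584\u2584  "),
--     '3': (" \u2584\u2584  ", "   \u2588 ", " \u2580\u2580\u2584 ", " \u2584\u2584\u2580 "),
--     '4': ("     ", "\u2588  \u2588 ", " \u2580\u2580\u2584 ", "   \u2580 "),
--     '5': (" \u2584\u2584  ", "\u2588    ", " \u2580\u2580\u2584 ", " \u2584\u2584\u2580 "),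
--     '6': (" \u2584\u2584  ", "\u2588    ", "\u2584\u2580\u2580\u2584 ", "\u2580\u2584\u2584\u2580 "),
--     '7': (" \u2584\u2584  ", "   \u2588 ", "   \u2584 ", "   \u2580 "),
--     '8': (" \u2584\u2584  ", "\u2588  \u2588 ", "\u2584\u2580\u2580\u2584 ", "\u2580\u2584\u2584\u2580 "),
--     '9': (" \u2584\u2584  ", "\u2588  \u2588 ", " \u2580\u2580\u2584 ", " \u2584\u2584\u2580 "),
--     ':': ("     ", "  \u25cf  ", "  \u25cf  ", "     "),
--     ' ': ("     ", "     ", "     ", "     "),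
-- }
--
-- def drawBigString(s):
--     lines = [[], [], [], []]
--     for c in s:
--         rows = _BIG.get(c)
--         if rows is not None:
--             for i in range(4):
--                 lines[i].append(rows[i])
--         else:
--             for i in range(4):
--                 lines[i].append(" ")
--     return "\n".join("".join(parts) for parts in lines) + "\n"
-- ===== Notes on version B (the rewrite author's own statement) =====
-- stated objective: alternative
-- what changed: B makes one pass over the string maintaining four per-row line buffers from a pre-split glyph-row table, instead of A's outer loop over rows that re-scans the whole string and re-slices each 20-char glyph once per row.
import Mathlib
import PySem

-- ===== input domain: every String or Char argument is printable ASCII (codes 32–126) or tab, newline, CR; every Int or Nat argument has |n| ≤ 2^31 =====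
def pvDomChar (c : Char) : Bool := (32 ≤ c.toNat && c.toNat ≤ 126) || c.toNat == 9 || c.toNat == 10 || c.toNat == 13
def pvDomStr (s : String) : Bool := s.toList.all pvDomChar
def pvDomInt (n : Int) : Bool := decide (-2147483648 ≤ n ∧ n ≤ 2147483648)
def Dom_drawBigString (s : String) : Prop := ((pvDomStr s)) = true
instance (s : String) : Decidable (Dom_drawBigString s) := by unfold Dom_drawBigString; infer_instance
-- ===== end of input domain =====

-- B replaces A's per-row re-scan of s by ONE pass over s feeding four line accumulators (same output; objective: alternative decomposition).

-- ===== PORT A =====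
def pvCharsA : PySem.Dict String String :=
  (((((((((((((PySem.Dict.empty.insert "Resolution" "5x4").insert "0" " ▄▄  █  █ ▄  ▄ ▀▄▄▀ ").insert "1" "        █    ▄    ▀ ").insert "2" " ▄▄     █ ▄▀▀  ▀▄▄  ").insert "3" " ▄▄     █  ▀▀▄  ▄▄▀ ").insert "4" "     █  █  ▀▀▄    ▀ ").insert "5" " ▄▄  █     ▀▀▄  ▄▄▀ ").insert "6" " ▄▄  █    ▄▀▀▄ ▀▄▄▀ ").insert "7" " ▄▄     █    ▄    ▀ ").insert "8" " ▄▄  █  █ ▄▀▀▄ ▀▄▄▀ ").insert "9" " ▄▄  █  █  ▀▀▄  ▄▄▀ ").insert ":" "       ●    ●       ").insert " " "                    ")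

def pvBigB : PySem.Dict String (String × String × String × String) :=
  ((((((((((((PySem.Dict.empty.insert "0" (" ▄▄  ", "█  █ ", "▄  ▄ ", "▀▄▄▀ ")).insert "1" ("     ", "   █ ", "   ▄ ", "   ▀ ")).insert "2" (" ▄▄  ", "   █ ", "▄▀▀  ", "▀▄▄  ")).insert "3" (" ▄▄  ", "   █ ", " ▀▀▄ ", " ▄▄▀ ")).insert "4" ("     ", "█  █ ", " ▀▀▄ ", "   ▀ ")).insert "5" (" ▄▄  ", "█    ", " ▀▀▄ ", " ▄▄▀ ")).insert "6" (" ▄▄  ", "█    ", "▄▀▀▄ ", "▀▄▄▀ ")).insert "7" (" ▄▄  ", "   █ ", "   ▄ ", "   ▀ ")).insert "8" (" ▄▄  ", "█  █ ", "▄▀▀▄ ", "▀▄▄▀ ")).insert "9" (" ▄▄  ", "█  █ ", " ▀▀▄ ", " ▄▄▀ ")).insert ":" ("     ", "  ●  ", "  ●  ", "     ")).insert " " ("     ", "     ", "     ", "     "))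

def drawBigString (s : String) : String :=
  match PySem.Str.split? ((pvCharsA.get? "Resolution").getD "") "x" with
  | some [cs, rs] =>
      String.ofList ((PySem.List.pyRange 0 ((PySem.Int.ofStr? rs).getD 0) 1).foldl (fun buffer y =>
        (s.toList.foldl (fun b ch =>
          match pvCharsA.get? (String.singleton ch) with
          | some fc => if fc ≠ "" then
              b ++ PySem.List.slice fc.toList (some (y * ((PySem.Int.ofStr? cs).getD 0)))
                (some ((y+1) * ((PySem.Int.ofStr? cs).getD 0)))
            else b ++ [' ']
          | none => b ++ [' ']) buffer) ++ ['\n']) [])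
  | _ => ""

-- ===== PORT B =====

def pvStepB (ls : List String × List String × List String × List String) (c : Char) :
    List String × List String × List String × List String :=
  match pvBigB.get? (String.singleton c) with
  | some (r0, r1, r2, r3) =>
      (ls.1 ++ [r0], ls.2.1 ++ [r1], ls.2.2.1 ++ [r2], ls.2.2.2 ++ [r3])
  | none => (ls.1 ++ [" "], ls.2.1 ++ [" "], ls.2.2.1 ++ [" "], ls.2.2.2 ++ [" "])

-- port of "".join(parts) (ported by hand as concatenation over the code points; exact for any strings)
def pvJoin (parts : List String) : List Char := parts.flatMap String.toList

def drawBigString_alt (s : String) : String :=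
  let ls := s.toList.foldl pvStepB ([], [], [], [])
  String.ofList (pvJoin ls.1 ++ '\n' :: pvJoin ls.2.1 ++ '\n' :: pvJoin ls.2.2.1 ++ '\n' :: pvJoin ls.2.2.2 ++ ['\n'])

-- ===== PRECONDITION & SPEC =====
def Spec_drawBigString (s : String) (out : String) : Prop := out = drawBigString_alt s
instance (s : String) (out : String) : Decidable (Spec_drawBigString s out) := by unfold Spec_drawBigString; infer_instance

-- ===== CLAIM (what is proved, stated in full; the proofs are below) =====
def Claim_equal_drawBigString : Prop := ∀ (s : String), Dom_drawBigString s → Spec_drawBigString s (drawBigString s)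

-- ===== LEMMAS AND PROOFS =====

-- A's per-character contribution to output row y (y*5 .. y*5+5 of the glyph), as a Char list
def pvContribA (y : Int) (ch : Char) : List Char :=
  match pvCharsA.get? (String.singleton ch) with
  | some fc => if fc ≠ "" then PySem.List.slice fc.toList (some (y*5)) (some ((y+1)*5)) else [' ']
  | none => [' ']

-- B's per-character contribution as a quadruple of row pieces
def pvContribB (ch : Char) : String × String × String × String :=
  match pvBigB.get? (String.singleton ch) with
  | some r => r
  | none => (" ", " ", " ", " ")

lemma pvSing_eq_iff (c : Char) (t : String) : (String.singleton c = t) ↔ [c] = t.toList := by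
  constructor
  · intro h; simpa using congrArg String.toList h
  · intro h
    have : String.ofList [c] = String.ofList t.toList := congrArg String.ofList h
    simpa using this

lemma pvGetA_none (ch : Char)
    (h : ch ∉ ['0','1','2','3','4','5','6','7','8','9',':',' ']) :
    pvCharsA.get? (String.singleton ch) = none := by
  simp only [List.mem_cons, not_or] at h
  obtain ⟨h0,h1,h2,h3,h4,h5,h6,h7,h8,h9,hc,hs,-⟩ := h
  simp [pvCharsA, PySem.Dict.get?_insert, PySem.Dict.get?_empty, pvSing_eq_iff,
        h0,h1,h2,h3,h4,h5,h6,h7,h8,h9,hc,hs]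

lemma pvGetB_none (ch : Char)
    (h : ch ∉ ['0','1','2','3','4','5','6','7','8','9',':',' ']) :
    pvBigB.get? (String.singleton ch) = none := by
  simp only [List.mem_cons, not_or] at h
  obtain ⟨h0,h1,h2,h3,h4,h5,h6,h7,h8,h9,hc,hs,-⟩ := h
  simp [pvBigB, PySem.Dict.get?_insert, PySem.Dict.get?_empty, pvSing_eq_iff,
        h0,h1,h2,h3,h4,h5,h6,h7,h8,h9,hc,hs]

lemma pvContrib_eq (ch : Char) :
    (pvContribA 0 ch, pvContribA 1 ch, pvContribA 2 ch, pvContribA 3 ch) =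
      ((pvContribB ch).1.toList, (pvContribB ch).2.1.toList,
       (pvContribB ch).2.2.1.toList, (pvContribB ch).2.2.2.toList) := by
  by_cases h : ch ∈ ['0','1','2','3','4','5','6','7','8','9',':',' ']
  · fin_cases h <;> decide
  · simp [pvContribA, pvContribB, pvGetA_none ch h, pvGetB_none ch h]

lemma pvFoldB_eq (l : List Char) (a0 a1 a2 a3 : List String) :
    l.foldl pvStepB (a0, a1, a2, a3) =
      (a0 ++ l.map (fun c => (pvContribB c).1),
       a1 ++ l.map (fun c => (pvContribB c).2.1),
       a2 ++ l.map (fun c => (pvContribB c).2.2.1),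
       a3 ++ l.map (fun c => (pvContribB c).2.2.2)) := by
  induction l generalizing a0 a1 a2 a3 with
  | nil => simp
  | cons c t ih =>
      have hstep : pvStepB (a0, a1, a2, a3) c =
          (a0 ++ [(pvContribB c).1], a1 ++ [(pvContribB c).2.1],
           a2 ++ [(pvContribB c).2.2.1], a3 ++ [(pvContribB c).2.2.2]) := by
        unfold pvStepB pvContribB
        cases pvBigB.get? (String.singleton c) with
        | none => rfl
        | some v => rcases v with ⟨r0, r1, r2, r3⟩; rfl
      simp [List.foldl_cons, hstep, ih]

lemma pvFoldA_row (y : Int) (l : List Char) (acc : List Char) :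
    l.foldl (fun b ch =>
        match pvCharsA.get? (String.singleton ch) with
        | some fc => if fc ≠ "" then b ++ PySem.List.slice fc.toList (some (y*5)) (some ((y+1)*5)) else b ++ [' ']
        | none => b ++ [' ']) acc
      = acc ++ l.flatMap (pvContribA y) := by
  induction l generalizing acc with
  | nil => simp
  | cons c t ih =>
      have hstep : ∀ b : List Char,
          (match pvCharsA.get? (String.singleton c) with
           | some fc => if fc ≠ "" then b ++ PySem.List.slice fc.toList (some (y*5)) (some ((y+1)*5)) else b ++ [' ']
           | none => b ++ [' ']) = b ++ pvContribA y c := by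
        intro b
        unfold pvContribA
        cases pvCharsA.get? (String.singleton c) with
        | none => rfl
        | some fc => by_cases hfc : fc = "" <;> simp [hfc]
      rw [List.foldl_cons, hstep acc, ih, List.flatMap_cons, List.append_assoc]

-- ===== VERDICT (by name: the statement is the Claim_ definition above) =====
theorem drawBigString_spec : Claim_equal_drawBigString := by
  intro s _
  unfold Spec_drawBigString drawBigString drawBigString_alt
  rw [show PySem.Str.split? ((pvCharsA.get? "Resolution").getD "") "x" = some ["5", "4"] from by decide]
  simp only [show (PySem.Int.ofStr? "5").getD 0 = (5 : Int) from by decide,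
             show (PySem.Int.ofStr? "4").getD 0 = (4 : Int) from by decide,
             show PySem.List.pyRange 0 4 1 = [0, 1, 2, 3] from by decide,
             List.foldl_cons, List.foldl_nil]
  rw [pvFoldA_row 0, pvFoldA_row 1, pvFoldA_row 2, pvFoldA_row 3, pvFoldB_eq]
  have e0 : pvContribA 0 = fun c => (pvContribB c).1.toList := funext fun c => congrArg (·.1) (pvContrib_eq c)
  have e1 : pvContribA 1 = fun c => (pvContribB c).2.1.toList := funext fun c => congrArg (·.2.1) (pvContrib_eq c)
  have e2 : pvContribA 2 = fun c => (pvContribB c).2.2.1.toList := funext fun c => congrArg (·.2.2.1) (pvContrib_eq c)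
  have e3 : pvContribA 3 = fun c => (pvContribB c).2.2.2.toList := funext fun c => congrArg (·.2.2.2) (pvContrib_eq c)
  rw [e0, e1, e2, e3]
  simp [pvJoin, List.flatMap_def, Function.comp_def]
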